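-- pv_equiv track=rewrite | github.com/CongyangY/UniGapClose | genome_gap_filler.py | generate_consensus_from_reads
-- ===== SOURCE A (Python) =====
-- from collections import defaultdict, Counter
--
-- def generate_consensus_from_reads(reads):
--     """
--     Generate consensus sequence from multiple reads using majority voting.
--
--     Args:
--         reads (list): List of sequences.
--
--     Returns:
--         str: Consensus sequence.
--     """
--     if not reads:
--         return "N" * 100  # Default sequence if no reads
--
--     consensus = []
--     read_length = max(len(read) for read in reads)
--     for i in range(read_length):
--         bases = [read[i].upper() for read in reads if i < len(read)]
--         if not bases:
--             consensus.append('N')  # Unknown base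
--             continue
--         base_counts = Counter(bases)
--         most_common_base, count = base_counts.most_common(1)[0]
--         consensus.append(most_common_base)
--     return "".join(consensus)
-- ===== SOURCE B (Python) =====
-- def generate_consensus_from_reads(reads):
--     """Single pass over each read, incrementing per-position base counters in
--     read order; one argmax per position at the end (first-seen base wins ties,
--     exactly Counter.most_common's tie-break)."""
--     if not reads:
--         return "N" * 100
--     counts = []  # counts[i]: dict base -> count, keys in first-occurrence order
--     for read in reads:
--         for i, b in enumerate(read.upper()):
--             if i == len(counts):
--                 counts.append({})
--             d = counts[i]
--             d[b] = d.get(b, 0) + 1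
--     return "".join(max(d.items(), key=lambda kv: kv[1])[0] for d in counts)
-- ===== Notes on version B (the rewrite author's own statement) =====
-- stated objective: faster
-- what changed: Replaces the per-position scan over all reads (building a fresh list and Counter for every column) by a single pass over each read that increments per-position counters in read order, then one argmax per position.
import Mathlib
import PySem

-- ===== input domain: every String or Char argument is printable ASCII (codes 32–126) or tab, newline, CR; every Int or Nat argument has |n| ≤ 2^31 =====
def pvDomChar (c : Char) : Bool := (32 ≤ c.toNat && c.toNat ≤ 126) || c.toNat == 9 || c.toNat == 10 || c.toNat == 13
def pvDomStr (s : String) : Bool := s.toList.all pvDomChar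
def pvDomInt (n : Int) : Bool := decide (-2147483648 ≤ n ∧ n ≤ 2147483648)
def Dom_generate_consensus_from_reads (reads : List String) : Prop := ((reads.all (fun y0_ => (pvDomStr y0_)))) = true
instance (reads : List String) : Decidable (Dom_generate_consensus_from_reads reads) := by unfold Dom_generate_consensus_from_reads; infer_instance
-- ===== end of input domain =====

-- B replaces A's per-position scan over all reads by a single pass over each read
-- maintaining per-position counters (asymptotically fewer operations when read lengths vary).


-- ===== PORT A =====
-- shared tiny helper: the first item with maximal count.  Exact both for A's
-- Counter.most_common(1)[0] (stable descending sort of items in insertion order: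
-- head = first item with maximal count) and for B's max(d.items(), key=kv[1])[0]
-- (Python max returns the first maximal element).  The 'N' branch is unreachable
-- (both programs only apply it to non-empty dicts).
def pvArgmax (d : PySem.Dict Char Int) : Char :=
  match PySem.List.max? d.items (fun kv => kv.2) with
  | some kv => kv.1
  | none => 'N'

-- read[i].upper() for a 1-char string is upperChar of that character (ASCII-exact);
-- under the guard i < len(read) (and 0 ≤ i from range) pyGet? is always some.
def pvBaseAt (i : Int) (read : String) : Option Char :=
  if i < PySem.Str.len read then (PySem.Str.pyGet? read i).map PySem.Chars.upperChar else none

def generate_consensus_from_reads (reads : List String) : String :=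
  match reads with
  | [] => String.ofList (List.replicate 100 'N')
  | r0 :: rest =>
    -- read_length = max(len(read) for read in reads); the list is non-empty so
    -- max? is some and the .getD 0 default is never used
    let read_length : Int :=
      (PySem.List.max? ((r0 :: rest).map PySem.Str.len) (fun x => x)).getD 0
    let consensus : List Char :=
      (PySem.List.pyRange 0 read_length 1).foldl (fun acc i =>
        let bases := (r0 :: rest).filterMap (fun read => pvBaseAt i read)
        acc ++ [if bases = [] then 'N' else pvArgmax (PySem.Dict.counter bases)]) []
    String.ofList consensus

-- ===== PORT B =====
-- d[b] = d.get(b, 0) + 1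
def pvStep (d : PySem.Dict Char Int) (c : Char) : PySem.Dict Char Int :=
  d.insert c (d.getD c 0 + 1)

-- the inner 'for i, b in enumerate(read.upper())' loop: walk the read's characters
-- in parallel with the counts list, appending a fresh {} exactly when i == len(counts)
def pvBumpRead : List Char → List (PySem.Dict Char Int) → List (PySem.Dict Char Int)
  | [], ds => ds
  | c :: cs, [] => pvStep PySem.Dict.empty c :: pvBumpRead cs []
  | c :: cs, d :: ds => pvStep d c :: pvBumpRead cs ds

def generate_consensus_from_reads_alt (reads : List String) : String :=
  match reads with
  | [] => String.ofList (List.replicate 100 'N')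
  | r0 :: rest =>
    let counts := (r0 :: rest).foldl (fun ds r => pvBumpRead (PySem.Str.upper r).toList ds) []
    String.ofList (counts.map pvArgmax)

-- ===== PRECONDITION & SPEC =====
def Spec_generate_consensus_from_reads (reads : List String) (out : String) : Prop := out = generate_consensus_from_reads_alt reads
instance (reads : List String) (out : String) : Decidable (Spec_generate_consensus_from_reads reads out) := by unfold Spec_generate_consensus_from_reads; infer_instance

-- ===== CLAIM (what is proved, stated in full; the proofs are below) =====
def Claim_equal_generate_consensus_from_reads : Prop := ∀ (reads : List String), Dom_generate_consensus_from_reads reads → Spec_generate_consensus_from_reads reads (generate_consensus_from_reads reads)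

-- ===== LEMMAS AND PROOFS =====

-- per-position base column of the upper-cased reads
def pvBasesAt (reads : List String) (i : Nat) : List Char :=
  reads.filterMap (fun r => ((PySem.Str.upper r).toList)[i]?)

theorem pvBumpRead_length (cs : List Char) (ds : List (PySem.Dict Char Int)) :
    (pvBumpRead cs ds).length = max cs.length ds.length := by
  induction cs generalizing ds with
  | nil => simp [pvBumpRead]
  | cons c cs ih =>
    cases ds with
    | nil => simp only [pvBumpRead, List.length_cons, List.length_nil, ih]; omega
    | cons d ds => simp only [pvBumpRead, List.length_cons, ih]; omega

theorem pvBumpRead_getElem? (cs : List Char) (ds : List (PySem.Dict Char Int)) (i : Nat) :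
    (pvBumpRead cs ds)[i]? =
      match cs[i]? with
      | some c => some (pvStep ((ds[i]?).getD PySem.Dict.empty) c)
      | none => ds[i]? := by
  induction cs generalizing ds i with
  | nil => simp [pvBumpRead]
  | cons c cs ih =>
    cases ds with
    | nil =>
      cases i with
      | zero => simp [pvBumpRead]
      | succ j => simpa [pvBumpRead] using ih [] j
    | cons d ds =>
      cases i with
      | zero => simp [pvBumpRead]
      | succ j => simpa [pvBumpRead] using ih ds j

theorem pvFold_getElem? (reads : List String) (ds : List (PySem.Dict Char Int)) (i : Nat) :
    (reads.foldl (fun a r => pvBumpRead (PySem.Str.upper r).toList a) ds)[i]? =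
      match ds[i]? with
      | some d => some ((pvBasesAt reads i).foldl pvStep d)
      | none =>
        if pvBasesAt reads i = [] then none
        else some ((pvBasesAt reads i).foldl pvStep PySem.Dict.empty) := by
  induction reads generalizing ds with
  | nil => cases h : ds[i]? <;> simp [pvBasesAt, h]
  | cons r rest ih =>
    simp only [List.foldl_cons]
    rw [ih, pvBumpRead_getElem?]
    cases hc : (PySem.Str.upper r).toList[i]? with
    | none =>
      have hb : pvBasesAt (r :: rest) i = pvBasesAt rest i := by
        simp only [pvBasesAt, List.filterMap_cons]
        rw [hc]
      rw [hb]
    | some c =>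
      have hb : pvBasesAt (r :: rest) i = c :: pvBasesAt rest i := by
        simp only [pvBasesAt, List.filterMap_cons]
        rw [hc]
      cases hd : ds[i]? with
      | none => rw [hb]; simp [List.foldl_cons]
      | some d => rw [hb]; simp [List.foldl_cons]

theorem pvFold_length (reads : List String) (ds : List (PySem.Dict Char Int)) :
    (reads.foldl (fun a r => pvBumpRead (PySem.Str.upper r).toList a) ds).length =
      reads.foldl (fun n r => max (PySem.Str.upper r).toList.length n) ds.length := by
  induction reads generalizing ds with
  | nil => rfl
  | cons r rest ih => simp only [List.foldl_cons]; rw [ih, pvBumpRead_length]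

theorem pvLenUpper (r : String) : (PySem.Str.upper r).toList.length = r.toList.length := by
  simp [PySem.Str.toList_upper, PySem.Chars.upper]

theorem pvFoldMaxCast (l : List String) (a : Nat) :
    l.foldl (fun m r => max m (PySem.Str.len r)) (a : Int) =
      ((l.foldl (fun m r => max m r.toList.length) a : Nat) : Int) := by
  induction l generalizing a with
  | nil => rfl
  | cons x l ih =>
    simp only [List.foldl_cons, PySem.Str.len_eq, ← Nat.cast_max]
    exact ih _

theorem pvFoldFlip (l : List String) (a : Nat) :
    l.foldl (fun n r => max r.toList.length n) a =
      l.foldl (fun m r => max m r.toList.length) a := by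
  induction l generalizing a with
  | nil => rfl
  | cons x l ih =>
    simp only [List.foldl_cons]
    rw [Nat.max_comm]
    exact ih _

-- A's comprehension at integer index ↑k is exactly the column pvBasesAt reads k
theorem pvBasesA_eq (reads : List String) (k : Nat) :
    reads.filterMap (fun read => pvBaseAt (k : Int) read) = pvBasesAt reads k := by
  unfold pvBasesAt
  apply List.filterMap_congr
  intro r _
  simp only [pvBaseAt, PySem.Str.pyGet?_natCast, PySem.Str.len_eq,
    PySem.Str.toList_upper]
  show _ = (PySem.Chars.upper r.toList)[k]?
  have hup : PySem.Chars.upper r.toList = r.toList.map PySem.Chars.upperChar := rfl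
  rw [hup, List.getElem?_map]
  split_ifs with h
  · rfl
  · rw [List.getElem?_eq_none (by exact_mod_cast not_lt.mp h)]; rfl

-- ===== VERDICT (by name: the statement is the Claim_ definition above) =====
theorem generate_consensus_from_reads_spec : Claim_equal_generate_consensus_from_reads := by
  intro reads _
  unfold Spec_generate_consensus_from_reads
  unfold generate_consensus_from_reads generate_consensus_from_reads_alt
  cases reads with
  | nil => rfl
  | cons r0 rest =>
    simp only []
    congr 1
    -- A's appending fold is a map over the range
    rw [PySem.List.foldl_append_singleton_eq_map
      (fun i => if (r0 :: rest).filterMap (fun read => pvBaseAt i read) = [] then 'N'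
                else pvArgmax (PySem.Dict.counter
                  ((r0 :: rest).filterMap (fun read => pvBaseAt i read))))]
    rw [List.nil_append, PySem.List.pyRange_one, List.map_map]
    set counts := (r0 :: rest).foldl (fun ds r => pvBumpRead (PySem.Str.upper r).toList ds) []
    -- the two lengths agree
    have hL : ((PySem.List.max? ((r0 :: rest).map PySem.Str.len) (fun x => x)).getD 0 - 0).toNat
        = counts.length := by
      have h1 : counts.length = (r0 :: rest).foldl (fun n r => max (PySem.Str.upper r).toList.length n) 0 :=
        pvFold_length _ []
      simp only [List.map_cons, PySem.List.max?_id_cons, Option.getD_some, Int.sub_zero]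
      have h2 : (rest.map PySem.Str.len).foldl max (PySem.Str.len r0)
          = rest.foldl (fun m r => max m (PySem.Str.len r)) (PySem.Str.len r0) := by
        rw [List.foldl_map]
      rw [h2, PySem.Str.len_eq r0, pvFoldMaxCast, Int.toNat_natCast, h1]
      simp only [List.foldl_cons, pvLenUpper, Nat.max_zero]
      rw [pvFoldFlip]
    rw [hL]
    -- elementwise
    apply List.ext_getElem
    · simp
    intro k hk1 hk2
    simp only [List.getElem_map, List.getElem_range, Function.comp_apply, Int.zero_add]
    have hkc : k < counts.length := by simpa using hk2
    have hcell := pvFold_getElem? (r0 :: rest) [] k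
    rw [List.getElem?_eq_getElem hkc] at hcell
    simp only [List.getElem?_nil] at hcell
    rw [pvBasesA_eq (r0 :: rest) k]
    by_cases hnil : pvBasesAt (r0 :: rest) k = []
    · rw [hnil] at hcell; simp at hcell
    · rw [if_neg hnil] at hcell ⊢
      have : counts[k] = (pvBasesAt (r0 :: rest) k).foldl pvStep PySem.Dict.empty :=
        Option.some.inj hcell
      rw [this]
      congr 1
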